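-- pv_equiv track=rewrite | github.com/anuragvishwa/kgroot-latest | mini-server-prod/kgroot-services/ai-sre-platform/src/incident_resolver/risk_assessor.py | _elevate_risk
-- ===== SOURCE A (Python) =====
-- from enum import Enum
-- from typing import Dict, List, Any, Optional
--
-- class RiskLevel(str, Enum):
--     """Risk levels for remediation actions"""
--     LOW = "LOW"           # Read-only, safe operations
--     MEDIUM = "MEDIUM"     # Pod restarts, config changes
--     HIGH = "HIGH"         # Scaling, resource modifications
--     CRITICAL = "CRITICAL" # Deletions, cluster-wide changes
--
-- def _elevate_risk(base_risk: RiskLevel, risk_factors: List[str]) -> RiskLevel: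
--     """Elevate risk level based on risk factors"""
--     if not risk_factors:
--         return base_risk
--
--     # Count high-severity factors
--     high_severity_count = sum(1 for factor in risk_factors if any(
--         keyword in factor.lower()
--         for keyword in ["production", "critical", "stateful", "database", "cluster-wide"]
--     ))
--
--     # Elevate if multiple high-severity factors
--     if high_severity_count >= 2:
--         if base_risk == RiskLevel.LOW:
--             return RiskLevel.MEDIUM
--         elif base_risk == RiskLevel.MEDIUM:
--             return RiskLevel.HIGH
--         elif base_risk == RiskLevel.HIGH:
--             return RiskLevel.CRITICAL
--
--     # Elevate if any single critical factor
--     if high_severity_count >= 1 and base_risk == RiskLevel.MEDIUM: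
--         return RiskLevel.HIGH
--
--     return base_risk
-- ===== SOURCE B (Python) =====
-- _KEYWORDS = ["production", "critical", "stateful", "database", "cluster-wide"]
-- # next level up; levels already at the top (or unknown labels) have no entry
-- _BUMP = {"LOW": "MEDIUM", "MEDIUM": "HIGH", "HIGH": "CRITICAL"}
--
-- def _elevate_risk(base_risk, risk_factors):
--     # Streaming automaton: walk the factors once, carrying the current level and
--     # whether a severe factor was already seen; stop as soon as the (single
--     # possible) elevation has happened.  A MEDIUM base is elevated on the first
--     # severe factor; any other base is elevated only on the second one.
--     level = base_risk
--     seen = False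
--     for factor in risk_factors:
--         low = factor.lower()
--         if any(k in low for k in _KEYWORDS):
--             if not seen and level != "MEDIUM":
--                 seen = True
--             else:
--                 level = _BUMP.get(level, level)
--                 break
--     return level
-- ===== Notes on version B (the rewrite author's own statement) =====
-- stated objective: alternative
-- what changed: Replaces the count-then-branch-ladder design by a streaming automaton: one walk over the factors carrying the current level and a seen-flag, elevating via a successor table (MEDIUM on the first severe factor, any other level on the second) and stopping early once the single possible elevation has happened.
import Mathlib
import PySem

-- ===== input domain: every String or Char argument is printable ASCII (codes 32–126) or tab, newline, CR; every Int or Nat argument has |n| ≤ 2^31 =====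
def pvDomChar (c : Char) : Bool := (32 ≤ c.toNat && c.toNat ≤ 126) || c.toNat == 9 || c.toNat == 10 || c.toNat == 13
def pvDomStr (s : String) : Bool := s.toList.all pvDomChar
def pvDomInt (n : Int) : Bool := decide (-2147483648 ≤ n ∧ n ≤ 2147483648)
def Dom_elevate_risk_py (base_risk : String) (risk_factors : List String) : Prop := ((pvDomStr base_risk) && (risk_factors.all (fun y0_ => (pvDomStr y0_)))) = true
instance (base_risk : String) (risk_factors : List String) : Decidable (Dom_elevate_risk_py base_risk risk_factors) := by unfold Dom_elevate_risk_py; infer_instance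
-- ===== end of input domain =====

-- B replaces A's count-then-branch-ladder by a one-pass streaming automaton with early exit (alternative decomposition, same cost).


-- ===== PORT A =====
def pvKeywords : List String := ["production", "critical", "stateful", "database", "cluster-wide"]

def pvHighSeverity (factor : String) : Bool :=
  pvKeywords.any (fun keyword => PySem.Str.isIn keyword (PySem.Str.lower factor))

def elevate_risk_py (base_risk : String) (risk_factors : List String) : String :=
  if risk_factors = [] then base_risk
  else
    -- sum(1 for factor in risk_factors if any(keyword in factor.lower() ...))
    let high_severity_count : Nat :=
      risk_factors.foldl (fun acc factor => if pvHighSeverity factor then acc + 1 else acc) 0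
    if 2 ≤ high_severity_count ∧ base_risk = "LOW" then "MEDIUM"
    else if 2 ≤ high_severity_count ∧ base_risk = "MEDIUM" then "HIGH"
    else if 2 ≤ high_severity_count ∧ base_risk = "HIGH" then "CRITICAL"
    else if 1 ≤ high_severity_count ∧ base_risk = "MEDIUM" then "HIGH"
    else base_risk

-- ===== PORT B =====
-- _BUMP = {"LOW": "MEDIUM", "MEDIUM": "HIGH", "HIGH": "CRITICAL"}
def pvBump : PySem.Dict String String := PySem.Dict.ofList [("LOW", "MEDIUM"), ("MEDIUM", "HIGH"), ("HIGH", "CRITICAL")]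

-- the for-loop of Source B; 'break' is modelled by returning the elevated level immediately
def pvAltLoop (level : String) (seen : Bool) : List String → String
  | [] => level
  | factor :: rest =>
    if pvHighSeverity factor then
      if !seen && !(level = "MEDIUM") then pvAltLoop level true rest
      else PySem.Dict.getD pvBump level level   -- level = _BUMP.get(level, level); break
    else pvAltLoop level seen rest

def elevate_risk_py_alt (base_risk : String) (risk_factors : List String) : String :=
  pvAltLoop base_risk false risk_factors

-- ===== PRECONDITION & SPEC =====
def Spec_elevate_risk_py (base_risk : String) (risk_factors : List String) (out : String) : Prop := out = elevate_risk_py_alt base_risk risk_factors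
instance (base_risk : String) (risk_factors : List String) (out : String) : Decidable (Spec_elevate_risk_py base_risk risk_factors out) := by unfold Spec_elevate_risk_py; infer_instance

-- ===== CLAIM (what is proved, stated in full; the proofs are below) =====
def Claim_equal_elevate_risk_py : Prop := ∀ (base_risk : String) (risk_factors : List String), Dom_elevate_risk_py base_risk risk_factors → Spec_elevate_risk_py base_risk risk_factors (elevate_risk_py base_risk risk_factors)

-- ===== LEMMAS AND PROOFS =====
theorem pv_foldl_count_eq_filter_length (l : List String) (acc : Nat) :
    l.foldl (fun acc factor => if pvHighSeverity factor then acc + 1 else acc) acc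
      = acc + (l.filter (fun f => pvHighSeverity f)).length := by
  induction l generalizing acc with
  | nil => simp
  | cons x xs ih =>
    simp only [List.foldl_cons, List.filter_cons]
    by_cases h : pvHighSeverity x = true
    · simp [h, ih]; omega
    · simp [h, ih]

-- what the loop computes after a severe factor has already been seen
theorem pv_altLoop_true (level : String) (l : List String) :
    pvAltLoop level true l =
      if 1 ≤ (l.filter (fun f => pvHighSeverity f)).length
      then PySem.Dict.getD pvBump level level else level := by
  induction l with
  | nil => simp [pvAltLoop]
  | cons x xs ih =>
    by_cases h : pvHighSeverity x = true
    · simp [pvAltLoop, h, List.filter_cons]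
    · simp [pvAltLoop, h, List.filter_cons, ih]

-- what the loop computes from the start
theorem pv_altLoop_false (level : String) (l : List String) :
    pvAltLoop level false l =
      if level = "MEDIUM" then
        (if 1 ≤ (l.filter (fun f => pvHighSeverity f)).length
         then PySem.Dict.getD pvBump level level else level)
      else
        (if 2 ≤ (l.filter (fun f => pvHighSeverity f)).length
         then PySem.Dict.getD pvBump level level else level) := by
  induction l with
  | nil => simp [pvAltLoop]
  | cons x xs ih =>
    by_cases h : pvHighSeverity x = true
    · by_cases hm : level = "MEDIUM"
      · simp [pvAltLoop, h, hm, List.filter_cons]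
      · simp [pvAltLoop, h, hm, List.filter_cons, pv_altLoop_true]
    · simp [pvAltLoop, h, List.filter_cons, ih]

theorem pv_bump_other (level : String) (h1 : ¬ level = "LOW") (h2 : ¬ level = "MEDIUM")
    (h3 : ¬ level = "HIGH") : PySem.Dict.getD pvBump level level = level := by
  have e : pvBump = PySem.Dict.mk [("LOW", "MEDIUM"), ("MEDIUM", "HIGH"), ("HIGH", "CRITICAL")] := by
    decide
  rw [e]
  simp [PySem.Dict.getD, Ne.symm h1, Ne.symm h2, Ne.symm h3, PySem.Dict.get?]

-- ===== VERDICT (by name: the statement is the Claim_ definition above) =====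
theorem elevate_risk_py_spec : Claim_equal_elevate_risk_py := by
  intro base_risk risk_factors _
  unfold Spec_elevate_risk_py elevate_risk_py elevate_risk_py_alt
  by_cases hnil : risk_factors = []
  · simp [hnil, pvAltLoop]
  · simp only [hnil, if_false]
    rw [pv_foldl_count_eq_filter_length, pv_altLoop_false]
    simp only [Nat.zero_add]
    generalize (List.filter (fun f => pvHighSeverity f) risk_factors).length = c
    by_cases h1 : base_risk = "LOW" <;> by_cases h2 : base_risk = "MEDIUM" <;>
      by_cases h3 : base_risk = "HIGH" <;>
      rcases c with _ | _ | c <;>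
      simp_all [show PySem.Dict.getD pvBump "LOW" "LOW" = "MEDIUM" from by decide,
        show PySem.Dict.getD pvBump "MEDIUM" "MEDIUM" = "HIGH" from by decide,
        show PySem.Dict.getD pvBump "HIGH" "HIGH" = "CRITICAL" from by decide] <;>
      first
        | omega
        | (rw [pv_bump_other base_risk h1 h2 h3])
        | rfl
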